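-- pv_equiv track=rewrite | github.com/CAMeL-Lab/seq2seq-transliteration-tool | ai/datasets/base_dataset.py | trainTags
-- ===== SOURCE A (Python) =====
-- def trainTags(input_list):
--   """ Converts the train input into a list that has tags seperate from normal characters
--   Example: input of "<bos><bow>mnfukha<eow>shwaya<spa>walahy<eos>" would be converted to
--   ['<bos>', '<bow>', 'm', 'n', 'f', 'u', 'k', 'h', 'a', '<eow>', 's', 'h', 'w', 'a', 'y', 'a',
--   '<spa>', 'w', 'a', 'l', 'a', 'h', 'y', '<eos>']
--   """
--   tags = ['<bos>', '<eos>', '<bow>', '<eow>', '<wb>', "<boq>", "<eoq>"]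
--   line = []
--
--   i = 0
--   while i < len(input_list):
--       if input_list[i] == "<" and input_list[i:i+5] in tags:
--           line.append(input_list[i:i+5])
--           i += 5
--
--       elif input_list[i] == "<" and input_list[i:i+4] in tags:
--           line.append(input_list[i:i+4])
--           i += 4
--
--       else:
--           line.append(input_list[i])
--           i += 1
--
--   return line
-- ===== SOURCE B (Python) =====
-- import re
--
-- _TOKEN_RE = re.compile(r'<bos>|<eos>|<bow>|<eow>|<boq>|<eoq>|<wb>|[\s\S]')
--
-- def trainTags(input_list):
--   """Tokenize a transliteration string into tags and single characters
--   using one regex scan: complete tags are listed before the single-character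
--   catch-all, so they take precedence exactly as in the index-walking version."""
--   return _TOKEN_RE.findall(input_list)
-- ===== Notes on version B (the rewrite author's own statement) =====
-- stated objective: idiomatic
-- what changed: Replaced the hand-written index-walking while loop with slice membership tests by a single compiled-regex findall whose alternation lists the seven literal tags before a [\s\S] single-character catch-all.
import Mathlib
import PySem

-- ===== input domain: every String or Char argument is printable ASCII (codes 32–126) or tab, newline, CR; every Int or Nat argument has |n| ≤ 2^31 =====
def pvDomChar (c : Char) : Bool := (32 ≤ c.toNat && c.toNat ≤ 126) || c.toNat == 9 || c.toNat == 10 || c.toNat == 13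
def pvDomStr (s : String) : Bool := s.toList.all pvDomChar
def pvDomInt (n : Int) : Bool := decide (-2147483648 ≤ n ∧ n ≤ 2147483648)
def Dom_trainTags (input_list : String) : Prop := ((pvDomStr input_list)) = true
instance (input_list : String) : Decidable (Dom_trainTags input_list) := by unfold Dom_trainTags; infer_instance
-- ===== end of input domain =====

-- B replaces A's index-walking loop with one regex-findall scan (tags before a
-- single-char catch-all); same tokens, idiomatic one-liner in Python.

-- ===== PORT A =====
-- A's while loop over index i, transcribed as structural recursion on the
-- character suffix: input_list[i:i+5] is (take 5) of the suffix, i += k is (drop k).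
def trainTagsGo (cs : List Char) : List String :=
  match cs with
  | [] => []
  | c :: rest =>
    if c = '<' ∧ String.ofList ((c :: rest).take 5) ∈
        ["<bos>", "<eos>", "<bow>", "<eow>", "<wb>", "<boq>", "<eoq>"] then
      String.ofList ((c :: rest).take 5) :: trainTagsGo (rest.drop 4)
    else if c = '<' ∧ String.ofList ((c :: rest).take 4) ∈
        ["<bos>", "<eos>", "<bow>", "<eow>", "<wb>", "<boq>", "<eoq>"] then
      String.ofList ((c :: rest).take 4) :: trainTagsGo (rest.drop 3)
    else
      String.ofList [c] :: trainTagsGo rest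
termination_by cs.length
decreasing_by all_goals simp

def trainTags (input_list : String) : List String :=
  trainTagsGo input_list.toList

-- ===== PORT B =====
-- B's regex alternation: at each position try the seven literal tags in order,
-- else the [\s\S] catch-all consumes one character (findall's leftmost scan).
def trainTagsAltGo (cs : List Char) : List String :=
  match cs with
  | [] => []
  | c :: rest =>
    if ['<','b','o','s','>'].isPrefixOf (c :: rest) then "<bos>" :: trainTagsAltGo (rest.drop 4)
    else if ['<','e','o','s','>'].isPrefixOf (c :: rest) then "<eos>" :: trainTagsAltGo (rest.drop 4)
    else if ['<','b','o','w','>'].isPrefixOf (c :: rest) then "<bow>" :: trainTagsAltGo (rest.drop 4)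
    else if ['<','e','o','w','>'].isPrefixOf (c :: rest) then "<eow>" :: trainTagsAltGo (rest.drop 4)
    else if ['<','b','o','q','>'].isPrefixOf (c :: rest) then "<boq>" :: trainTagsAltGo (rest.drop 4)
    else if ['<','e','o','q','>'].isPrefixOf (c :: rest) then "<eoq>" :: trainTagsAltGo (rest.drop 4)
    else if ['<','w','b','>'].isPrefixOf (c :: rest) then "<wb>" :: trainTagsAltGo (rest.drop 3)
    else String.ofList [c] :: trainTagsAltGo rest
termination_by cs.length
decreasing_by all_goals simp

def trainTags_alt (input_list : String) : List String :=
  trainTagsAltGo input_list.toList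

-- ===== PRECONDITION & SPEC =====
def Spec_trainTags (input_list : String) (out : List String) : Prop := out = trainTags_alt input_list
instance (input_list : String) (out : List String) : Decidable (Spec_trainTags input_list out) := by unfold Spec_trainTags; infer_instance

-- ===== CLAIM (what is proved, stated in full; the proofs are below) =====
def Claim_equal_trainTags : Prop := ∀ (input_list : String), Dom_trainTags input_list → Spec_trainTags input_list (trainTags input_list)

-- ===== LEMMAS AND PROOFS =====

lemma ofList_eq_str (l : List Char) (s : String) : String.ofList l = s ↔ l = s.toList := by
  constructor
  · intro h; have := congrArg String.toList h; simpa using this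
  · intro h; subst h; simp

lemma mem_tags_iff (l : List Char) :
    String.ofList l ∈ ["<bos>", "<eos>", "<bow>", "<eow>", "<wb>", "<boq>", "<eoq>"] ↔
      l = ['<','b','o','s','>'] ∨ l = ['<','e','o','s','>'] ∨ l = ['<','b','o','w','>'] ∨
      l = ['<','e','o','w','>'] ∨ l = ['<','w','b','>'] ∨ l = ['<','b','o','q','>'] ∨
      l = ['<','e','o','q','>'] := by
  simp [List.mem_cons, ofList_eq_str]

lemma go_eq (cs : List Char) : trainTagsGo cs = trainTagsAltGo cs := by
  match cs with
  | [] => rw [trainTagsGo, trainTagsAltGo]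
  | c :: rest =>
    rw [trainTagsGo, trainTagsAltGo]
    by_cases h1 : ['<','b','o','s','>'] <+: (c :: rest)
    · obtain ⟨hc, h4⟩ : c = '<' ∧ rest.take 4 = ['b','o','s','>'] := by
        have := ((List.prefix_iff_eq_take.mp h1)).symm; simpa using this
      subst hc
      simp [List.isPrefixOf_iff_prefix, List.prefix_iff_eq_take, h4, go_eq (rest.drop 4)]
    by_cases h2 : ['<','e','o','s','>'] <+: (c :: rest)
    · obtain ⟨hc, h4⟩ : c = '<' ∧ rest.take 4 = ['e','o','s','>'] := by
        have := ((List.prefix_iff_eq_take.mp h2)).symm; simpa using this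
      subst hc
      simp [List.isPrefixOf_iff_prefix, List.prefix_iff_eq_take, h4, go_eq (rest.drop 4)]
    by_cases h3 : ['<','b','o','w','>'] <+: (c :: rest)
    · obtain ⟨hc, h4⟩ : c = '<' ∧ rest.take 4 = ['b','o','w','>'] := by
        have := ((List.prefix_iff_eq_take.mp h3)).symm; simpa using this
      subst hc
      simp [List.isPrefixOf_iff_prefix, List.prefix_iff_eq_take, h4, go_eq (rest.drop 4)]
    by_cases h4 : ['<','e','o','w','>'] <+: (c :: rest)
    · obtain ⟨hc, h4'⟩ : c = '<' ∧ rest.take 4 = ['e','o','w','>'] := by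
        have := ((List.prefix_iff_eq_take.mp h4)).symm; simpa using this
      subst hc
      simp [List.isPrefixOf_iff_prefix, List.prefix_iff_eq_take, h4', go_eq (rest.drop 4)]
    by_cases h5 : ['<','b','o','q','>'] <+: (c :: rest)
    · obtain ⟨hc, h4'⟩ : c = '<' ∧ rest.take 4 = ['b','o','q','>'] := by
        have := ((List.prefix_iff_eq_take.mp h5)).symm; simpa using this
      subst hc
      simp [List.isPrefixOf_iff_prefix, List.prefix_iff_eq_take, h4', go_eq (rest.drop 4)]
    by_cases h6 : ['<','e','o','q','>'] <+: (c :: rest)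
    · obtain ⟨hc, h4'⟩ : c = '<' ∧ rest.take 4 = ['e','o','q','>'] := by
        have := ((List.prefix_iff_eq_take.mp h6)).symm; simpa using this
      subst hc
      simp [List.isPrefixOf_iff_prefix, List.prefix_iff_eq_take, h4', go_eq (rest.drop 4)]
    by_cases h7 : ['<','w','b','>'] <+: (c :: rest)
    · obtain ⟨hc, h3'⟩ : c = '<' ∧ rest.take 3 = ['w','b','>'] := by
        have := ((List.prefix_iff_eq_take.mp h7)).symm; simpa using this
      subst hc
      have hrest : rest = 'w' :: 'b' :: '>' :: rest.drop 3 := by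
        conv_lhs => rw [← List.take_append_drop 3 rest]
        rw [h3']; rfl
      rcases hd : rest.drop 3 with _ | ⟨d, r⟩
      · rw [hrest, hd]
        simp [List.isPrefixOf_iff_prefix, List.prefix_iff_eq_take, trainTagsGo, trainTagsAltGo]
      · have hlr : rest.length = r.length + 4 := by
          have := congrArg List.length hd; simp at this; omega
        rw [hrest, hd]
        simp [List.isPrefixOf_iff_prefix, List.prefix_iff_eq_take, ofList_eq_str,
          go_eq (d :: r)]
    · -- no tag matches: both sides take the single-character branch
      have hA5 : String.ofList ((c :: rest).take 5) ∉
          ["<bos>", "<eos>", "<bow>", "<eow>", "<wb>", "<boq>", "<eoq>"] := by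
        rw [mem_tags_iff]; push_neg
        refine ⟨fun h => h1 ?_, fun h => h2 ?_, fun h => h3 ?_, fun h => h4 ?_,
          fun h => h7 ?_, fun h => h5 ?_, fun h => h6 ?_⟩
        · exact List.prefix_iff_eq_take.mpr (by simpa using h.symm)
        · exact List.prefix_iff_eq_take.mpr (by simpa using h.symm)
        · exact List.prefix_iff_eq_take.mpr (by simpa using h.symm)
        · exact List.prefix_iff_eq_take.mpr (by simpa using h.symm)
        · have h' : (c :: rest).take 4 = ['<','w','b','>'] := by
            have := congrArg (List.take 4) h; simpa [List.take_take] using this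
          exact List.prefix_iff_eq_take.mpr (by simpa using h'.symm)
        · exact List.prefix_iff_eq_take.mpr (by simpa using h.symm)
        · exact List.prefix_iff_eq_take.mpr (by simpa using h.symm)
      have hA4 : String.ofList ((c :: rest).take 4) ∉
          ["<bos>", "<eos>", "<bow>", "<eow>", "<wb>", "<boq>", "<eoq>"] := by
        rw [mem_tags_iff]; push_neg
        refine ⟨?_, ?_, ?_, ?_, fun h => h7 (List.prefix_iff_eq_take.mpr (by simpa using h.symm)),
          ?_, ?_⟩ <;>
          · intro h
            have := congrArg List.length h
            simp at this
            omega
      simp only [List.take_succ_cons] at hA5 hA4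
      simp [List.isPrefixOf_iff_prefix, hA5, hA4, h1, h2, h3, h4, h5, h6, h7,
        go_eq rest]
termination_by cs.length
decreasing_by all_goals simp <;> omega


-- ===== VERDICT (by name: the statement is the Claim_ definition above) =====
theorem trainTags_spec : Claim_equal_trainTags := by
  intro s _
  unfold Spec_trainTags trainTags trainTags_alt
  exact go_eq s.toList
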